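-- pv_equiv track=rewrite | github.com/pypi-data/pypi-mirror-389 | packages/wqdebug/wqdebug-1.0.6.tar.gz/wqdebug-1.0.6/src/wqdebug/offline_log/wquart/utility.py | getRangeNumber
-- ===== SOURCE A (Python) =====
-- def getNextNumber(num: int, param_max=0xFFF >> 2) -> int:
--     if num < 0 or num > param_max:
--         raise Exception('value is invalidd, must less than max')
--     if num == param_max:
--         return 0
--     return num + 1
--
-- def getRangeNumber(num: int, prevNum: int, param_max=0xFFF >> 2) -> list:
--     result = []
--     if num < 0 or num > param_max:
--         raise Exception('value is invalidd,must less than max')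
--     if prevNum < 0 or prevNum > param_max:
--         raise Exception('prevNum is invalidd,must less than max')
--     if num == prevNum:
--         return result
--     nextNum = prevNum
--     while True:
--         nextNum = getNextNumber(nextNum, param_max)
--         if num == nextNum:
--             break
--         result.append(nextNum)
--     return result
-- ===== SOURCE B (Python) =====
-- def getRangeNumber(num: int, prevNum: int, param_max=0xFFF >> 2) -> list:
--     if num < 0 or num > param_max:
--         raise Exception('value is invalidd,must less than max')
--     if prevNum < 0 or prevNum > param_max:
--         raise Exception('prevNum is invalidd,must less than max')
--     if num == prevNum:
--         return []
--     M = param_max + 1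
--     steps = (num - prevNum) % M
--     return [(prevNum + i) % M for i in range(1, steps)]
-- ===== Notes on version B (the rewrite author's own statement) =====
-- stated objective: simpler
-- what changed: A advances a counter one step at a time through the cyclic successor function until it hits num, appending as it goes; B computes the number of intermediate elements in closed form as (num - prevNum) mod (param_max+1) and generates them directly with modular arithmetic, eliminating the search loop.
import Mathlib
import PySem

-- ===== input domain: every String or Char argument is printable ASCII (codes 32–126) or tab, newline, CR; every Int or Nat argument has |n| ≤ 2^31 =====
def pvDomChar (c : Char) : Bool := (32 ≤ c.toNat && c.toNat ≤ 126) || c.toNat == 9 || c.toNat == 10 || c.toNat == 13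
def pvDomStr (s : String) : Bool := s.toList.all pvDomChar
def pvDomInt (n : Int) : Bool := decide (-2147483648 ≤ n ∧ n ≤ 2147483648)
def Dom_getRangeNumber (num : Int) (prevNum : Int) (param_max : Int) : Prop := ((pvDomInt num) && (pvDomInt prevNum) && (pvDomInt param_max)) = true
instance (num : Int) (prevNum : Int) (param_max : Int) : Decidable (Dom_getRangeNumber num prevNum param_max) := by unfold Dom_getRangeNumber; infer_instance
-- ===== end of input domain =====

-- B replaces A's advance-until-match loop by a closed-form element count plus direct modular
-- generation (objective: simpler). Pre_ excludes exactly the inputs where A raises.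

-- ===== PORT A =====
-- getNextNumber: its own range check raises, but inside the loop the argument always stays in
-- [0, param_max] under Pre_, so the raise branch is unreachable and omitted here.
def getNextNumberA (num : Int) (param_max : Int) : Int :=
  if num = param_max then 0 else num + 1

-- A's `while True` loop; the fuel only makes the recursion total in Lean (under Pre_ the loop
-- terminates within param_max steps, so the fuel used in getRangeNumber never runs out).
def getRangeLoopA (fuel : Nat) (num : Int) (param_max : Int) (nextNum : Int) : List Int :=
  match fuel with
  | 0 => []
  | f + 1 =>
    let n := getNextNumberA nextNum param_max
    if num = n then [] else n :: getRangeLoopA f num param_max n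

def getRangeNumber (num : Int) (prevNum : Int) (param_max : Int) : List Int :=
  if num < 0 ∨ num > param_max then []          -- raise, excluded by Pre_
  else if prevNum < 0 ∨ prevNum > param_max then []  -- raise, excluded by Pre_
  else if num = prevNum then []
  else getRangeLoopA (param_max.toNat + 1) num param_max prevNum

-- ===== PORT B =====
def getRangeNumber_alt (num : Int) (prevNum : Int) (param_max : Int) : List Int :=
  if num < 0 ∨ num > param_max then []          -- raise, excluded by Pre_
  else if prevNum < 0 ∨ prevNum > param_max then []  -- raise, excluded by Pre_
  else if num = prevNum then []
  else
    let M := param_max + 1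
    let steps := PySem.Int.mod (num - prevNum) M
    (PySem.List.pyRange 1 steps 1).map (fun i => PySem.Int.mod (prevNum + i) M)

-- ===== PRECONDITION & SPEC =====
-- exactly the inputs on which Python A returns (both validation guards pass); otherwise A raises
def Pre_getRangeNumber (num : Int) (prevNum : Int) (param_max : Int) : Prop :=
  0 ≤ num ∧ num ≤ param_max ∧ 0 ≤ prevNum ∧ prevNum ≤ param_max

instance (num : Int) (prevNum : Int) (param_max : Int) : Decidable (Pre_getRangeNumber num prevNum param_max) := by
  unfold Pre_getRangeNumber; infer_instance

def pvWitness_getRangeNumber : Int × Int × Int := (1, 3, 5)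

def Spec_getRangeNumber (num : Int) (prevNum : Int) (param_max : Int) (out : List Int) : Prop := out = getRangeNumber_alt num prevNum param_max
instance (num : Int) (prevNum : Int) (param_max : Int) (out : List Int) : Decidable (Spec_getRangeNumber num prevNum param_max out) := by unfold Spec_getRangeNumber; infer_instance

-- ===== CLAIM (what is proved, stated in full; the proofs are below) =====
def Claim_equal_getRangeNumber : Prop := ∀ (num : Int) (prevNum : Int) (param_max : Int), Dom_getRangeNumber num prevNum param_max → Pre_getRangeNumber num prevNum param_max → Spec_getRangeNumber num prevNum param_max (getRangeNumber num prevNum param_max)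

-- ===== LEMMAS AND PROOFS =====

-- Invariant of A's loop: if d is the cyclic distance from `next` to `num` (1 ≤ d ≤ param_max,
-- expressed linearly as num - next or num - next + (param_max+1)) and there is enough fuel,
-- the loop produces exactly the d-1 cyclic successors of `next`.
theorem getRangeLoopA_eq (f : Nat) (num param_max next d : Int)
    (hn0 : 0 ≤ num) (hn1 : num ≤ param_max)
    (hx0 : 0 ≤ next) (hx1 : next ≤ param_max)
    (hd : d = num - next ∨ d = num - next + (param_max + 1))
    (hd1 : 1 ≤ d) (hd2 : d ≤ param_max)
    (hf : d.toNat ≤ f) :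
    getRangeLoopA f num param_max next =
      (PySem.List.pyRange 1 d 1).map (fun i => (next + i) % (param_max + 1)) := by
  induction f generalizing next d with
  | zero => omega
  | succ f ih =>
    simp only [getRangeLoopA, getNextNumberA]
    by_cases hpm : next = param_max
    · rw [if_pos hpm]
      by_cases hnum : num = 0
      · -- num = n = 0, so d = 1 and the result is empty
        have hd' : d = 1 := by omega
        simp [hnum, hd', PySem.List.pyRange_one_eq_nil (by omega : (1:Int) ≤ 1)]
      · rw [if_neg hnum]
        have hd2' : 2 ≤ d := by omega
        rw [PySem.List.pyRange_one_cons (by omega : (1:Int) < d)]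
        have h01 : (next + 1) % (param_max + 1) = 0 := by rw [hpm]; exact Int.emod_self
        rw [ih 0 (d - 1) (by omega) (by omega) (by omega) (by omega) (by omega) (by omega)]
        refine List.cons_eq_cons.mpr ⟨h01.symm, ?_⟩
        rw [PySem.List.pyRange_one 1 (d - 1), PySem.List.pyRange_one (1 + 1) d,
            List.map_map, List.map_map]
        have hlen : (d - 1 - 1).toNat = (d - (1 + 1)).toNat := by omega
        rw [hlen]
        refine List.map_congr_left (fun k _ => ?_)
        show (0 + (1 + (k : Int))) % (param_max + 1) = (next + (1 + 1 + (k : Int))) % (param_max + 1)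
        have he : next + (1 + 1 + (k : Int)) = (0 + (1 + (k : Int))) + (param_max + 1) := by omega
        rw [he, Int.add_emod_right]
    · rw [if_neg hpm]
      by_cases hnum : num = next + 1
      · have hd' : d = 1 := by omega
        simp [hnum, hd', PySem.List.pyRange_one_eq_nil (by omega : (1:Int) ≤ 1)]
      · rw [if_neg hnum]
        have hd2' : 2 ≤ d := by omega
        rw [PySem.List.pyRange_one_cons (by omega : (1:Int) < d)]
        have h01 : (next + 1) % (param_max + 1) = next + 1 :=
          Int.emod_eq_of_lt (by omega) (by omega)
        rw [ih (next + 1) (d - 1) (by omega) (by omega) (by omega) (by omega) (by omega) (by omega)]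
        refine List.cons_eq_cons.mpr ⟨h01.symm, ?_⟩
        rw [PySem.List.pyRange_one 1 (d - 1), PySem.List.pyRange_one (1 + 1) d,
            List.map_map, List.map_map]
        have hlen : (d - 1 - 1).toNat = (d - (1 + 1)).toNat := by omega
        rw [hlen]
        refine List.map_congr_left (fun k _ => ?_)
        show (next + 1 + (1 + (k : Int))) % (param_max + 1) = (next + (1 + 1 + (k : Int))) % (param_max + 1)
        congr 1
        omega

-- ===== VERDICT (by name: the statement is the Claim_ definition above) =====
theorem getRangeNumber_spec : Claim_equal_getRangeNumber := by
  intro num prevNum param_max _ hpre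
  obtain ⟨h1, h2, h3, h4⟩ := hpre
  unfold Spec_getRangeNumber getRangeNumber getRangeNumber_alt
  rw [if_neg (by omega : ¬ (num < 0 ∨ num > param_max)),
      if_neg (by omega : ¬ (num < 0 ∨ num > param_max)),
      if_neg (by omega : ¬ (prevNum < 0 ∨ prevNum > param_max)),
      if_neg (by omega : ¬ (prevNum < 0 ∨ prevNum > param_max))]
  by_cases heq : num = prevNum
  · simp [heq]
  · rw [if_neg heq, if_neg heq]
    have hM : (0:Int) < param_max + 1 := by omega
    simp only [PySem.Int.mod_eq_emod_of_pos hM]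
    by_cases hlt : prevNum < num
    · have hmod : (num - prevNum) % (param_max + 1) = num - prevNum :=
        Int.emod_eq_of_lt (by omega) (by omega)
      rw [hmod]
      exact getRangeLoopA_eq _ num param_max prevNum (num - prevNum)
        h1 h2 h3 h4 (Or.inl rfl) (by omega) (by omega) (by omega)
    · have hmod : (num - prevNum) % (param_max + 1) = num - prevNum + (param_max + 1) := by
        rw [(Int.add_emod_right (num - prevNum) (param_max + 1)).symm]
        exact Int.emod_eq_of_lt (by omega) (by omega)
      rw [hmod]
      exact getRangeLoopA_eq _ num param_max prevNum (num - prevNum + (param_max + 1))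
        h1 h2 h3 h4 (Or.inr rfl) (by omega) (by omega) (by omega)
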